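-- pv_equiv track=rewrite | github.com/VamshiAlugoju/Video_summary | utils_video_summary.py | correct_segment_characters
-- ===== SOURCE A (Python) =====
-- dict_char_to_int = {
--     'O': '0', 'I': '1', 'S': '5', 'G': '6', 'Z': '2', 'B': '8',
--     'D': '0', 'Q': '0', 'L': '1', 'T': '7', 'A': '4'  # Additional common OCR errors
-- }
--
-- dict_int_to_char = {
--     '0': 'O', '1': 'I', '5': 'S', '6': 'G', '2': 'Z', '8': 'B',
--     '4': 'A', '7': 'T'  # Additional mappings
-- }
--
-- def correct_segment_characters(segment: str, segment_type: str) -> str: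
--     """
--     Correct characters in a segment based on expected type (letters or digits).
--     """
--     corrected = []
--     for char in segment:
--         if segment_type in ['state', 'series']:  # Should be letters
--             if char.isdigit():
--                 corrected.append(dict_int_to_char.get(char, char))
--             else:
--                 corrected.append(char)
--         elif segment_type in ['district', 'number']:  # Should be digits
--             if char.isalpha():
--                 corrected.append(dict_char_to_int.get(char, char))
--             else:
--                 corrected.append(char)
--         else:
--             corrected.append(char)
--
--     return ''.join(corrected)
-- ===== SOURCE B (Python) =====
-- dict_char_to_int = {
--     'O': '0', 'I': '1', 'S': '5', 'G': '6', 'Z': '2', 'B': '8',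
--     'D': '0', 'Q': '0', 'L': '1', 'T': '7', 'A': '4'
-- }
--
-- dict_int_to_char = {
--     '0': 'O', '1': 'I', '5': 'S', '6': 'G', '2': 'Z', '8': 'B',
--     '4': 'A', '7': 'T'
-- }
--
--
-- def correct_segment_characters(segment: str, segment_type: str) -> str:
--     """
--     Correct characters in a segment based on expected type (letters or digits).
--
--     Instead of walking the string character by character, apply each OCR
--     substitution as one whole-string replace pass.  This is exact because
--     no substitution's output is another substitution's key (digit keys map
--     to letters and letter keys map to digits), so the passes never cascade.
--     """
--     if segment_type in ('state', 'series'):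
--         mapping = dict_int_to_char
--     elif segment_type in ('district', 'number'):
--         mapping = dict_char_to_int
--     else:
--         return segment
--     for old, new in mapping.items():
--         segment = segment.replace(old, new)
--     return segment
-- ===== Notes on version B (the rewrite author's own statement) =====
-- stated objective: alternative
-- what changed: Instead of one per-character loop with isdigit/isalpha branches and dict lookups, B selects the mapping from segment_type and then runs one whole-string str.replace pass per substitution pair; exact because no substitution's output is another's key (digits map to letters and vice versa), so passes never cascade, and the dropped guards are redundant since each dict's keys only match the branch that selects it.
import Mathlib
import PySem

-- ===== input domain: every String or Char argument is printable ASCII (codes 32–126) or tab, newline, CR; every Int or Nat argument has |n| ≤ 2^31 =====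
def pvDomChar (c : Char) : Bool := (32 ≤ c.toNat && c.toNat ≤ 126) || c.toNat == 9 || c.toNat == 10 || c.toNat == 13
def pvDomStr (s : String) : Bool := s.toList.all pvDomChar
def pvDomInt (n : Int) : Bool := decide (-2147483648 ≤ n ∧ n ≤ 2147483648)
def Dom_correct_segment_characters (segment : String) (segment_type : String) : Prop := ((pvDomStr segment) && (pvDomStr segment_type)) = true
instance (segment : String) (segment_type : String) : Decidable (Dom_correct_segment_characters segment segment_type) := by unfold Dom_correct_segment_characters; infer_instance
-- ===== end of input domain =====

-- B replaces A's per-character branch-and-lookup loop with one whole-string replace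
-- pass per substitution pair of the mapping selected from segment_type (alternative
-- decomposition; exact because no substitution's output is another's key).

-- ===== PORT A =====
def dict_char_to_int : PySem.Dict Char Char := PySem.Dict.ofList
  [('O','0'),('I','1'),('S','5'),('G','6'),('Z','2'),('B','8'),
   ('D','0'),('Q','0'),('L','1'),('T','7'),('A','4')]

def dict_int_to_char : PySem.Dict Char Char := PySem.Dict.ofList
  [('0','O'),('1','I'),('5','S'),('6','G'),('2','Z'),('8','B'),
   ('4','A'),('7','T')]

def correct_segment_characters (segment : String) (segment_type : String) : String :=
  let corrected : List Char := segment.toList.foldl (fun acc char =>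
    if segment_type ∈ ["state", "series"] then
      if PySem.Chars.isdigit char then acc ++ [dict_int_to_char.getD char char]
      else acc ++ [char]
    else if segment_type ∈ ["district", "number"] then
      if PySem.Chars.isalpha char then acc ++ [dict_char_to_int.getD char char]
      else acc ++ [char]
    else acc ++ [char]) []
  String.mk corrected

-- ===== PORT B =====
-- Source B keeps the dicts as str→str maps of single-character strings.
def b_dict_char_to_int : PySem.Dict String String := PySem.Dict.ofList
  [("O","0"),("I","1"),("S","5"),("G","6"),("Z","2"),("B","8"),
   ("D","0"),("Q","0"),("L","1"),("T","7"),("A","4")]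

def b_dict_int_to_char : PySem.Dict String String := PySem.Dict.ofList
  [("0","O"),("1","I"),("5","S"),("6","G"),("2","Z"),("8","B"),
   ("4","A"),("7","T")]

-- the 'for old, new in mapping.items(): segment = segment.replace(old, new)' loop
def csc_replace_all (mapping : PySem.Dict String String) (segment : String) : String :=
  mapping.items.foldl (fun s p => PySem.Str.replace s p.1 p.2) segment

def correct_segment_characters_alt (segment : String) (segment_type : String) : String :=
  if segment_type ∈ ["state", "series"] then
    csc_replace_all b_dict_int_to_char segment
  else if segment_type ∈ ["district", "number"] then
    csc_replace_all b_dict_char_to_int segment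
  else segment

-- ===== PRECONDITION & SPEC =====
def Spec_correct_segment_characters (segment : String) (segment_type : String) (out : String) : Prop := out = correct_segment_characters_alt segment segment_type
instance (segment : String) (segment_type : String) (out : String) : Decidable (Spec_correct_segment_characters segment segment_type out) := by unfold Spec_correct_segment_characters; infer_instance

-- ===== CLAIM (what is proved, stated in full; the proofs are below) =====
def Claim_equal_correct_segment_characters : Prop := ∀ (segment : String) (segment_type : String), Dom_correct_segment_characters segment segment_type → Spec_correct_segment_characters segment segment_type (correct_segment_characters segment segment_type)

-- ===== LEMMAS AND PROOFS =====

-- foldl that appends one image per element is map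
theorem csc_foldl_map {α β : Type} (f : α → β) (l : List α) (acc : List β) :
    l.foldl (fun a c => a ++ [f c]) acc = acc ++ l.map f := by
  induction l generalizing acc with
  | nil => simp
  | cons x xs ih => simp [List.foldl, ih]

-- a guarded append-fold whose guard is absorbed by the image function is map
theorem csc_fold_if (p : Char → Bool) (g : Char → Char)
    (hg : ∀ c, (if p c then g c else c) = g c) (l : List Char) :
    l.foldl (fun acc c => if p c then acc ++ [g c] else acc ++ [c]) [] = l.map g := by
  have hfun : (fun (acc : List Char) c => if p c then acc ++ [g c] else acc ++ [c]) =
      fun acc c => acc ++ [g c] := by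
    funext acc c
    rw [show (if p c then acc ++ [g c] else acc ++ [c]) = acc ++ [if p c then g c else c] by
      split <;> rfl, hg c]
  rw [hfun, csc_foldl_map]; rfl

-- A's isdigit guard is redundant: dict_int_to_char's keys are all digits
theorem csc_step_int (c : Char) :
    (if PySem.Chars.isdigit c then dict_int_to_char.getD c c else c) =
      dict_int_to_char.getD c c := by
  by_cases h : PySem.Chars.isdigit c = true
  · simp [h]
  · simp only [h, Bool.false_eq_true, if_false]
    have hd : dict_int_to_char = PySem.Dict.mk
        [('0','O'),('1','I'),('5','S'),('6','G'),('2','Z'),('8','B'),('4','A'),('7','T')] := by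
      decide
    rw [hd]
    simp only [PySem.Dict.getD_eq_get?_getD, PySem.Dict.get?_mk_cons, beq_iff_eq]
    split_ifs with h1 h2 h3 h4 h5 h6 h7 h8 <;>
      first
        | rfl
        | (first | subst h1 | subst h2 | subst h3 | subst h4
                 | subst h5 | subst h6 | subst h7 | subst h8
           exact absurd (by decide) h)

-- A's isalpha guard is redundant: dict_char_to_int's keys are all letters
set_option maxHeartbeats 1000000 in
theorem csc_step_alpha (c : Char) :
    (if PySem.Chars.isalpha c then dict_char_to_int.getD c c else c) =
      dict_char_to_int.getD c c := by
  by_cases h : PySem.Chars.isalpha c = true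
  · simp [h]
  · simp only [h, Bool.false_eq_true, if_false]
    have hd : dict_char_to_int = PySem.Dict.mk
        [('O','0'),('I','1'),('S','5'),('G','6'),('Z','2'),('B','8'),('D','0'),
         ('Q','0'),('L','1'),('T','7'),('A','4')] := by
      decide
    rw [hd]
    simp only [PySem.Dict.getD_eq_get?_getD, PySem.Dict.get?_mk_cons, beq_iff_eq]
    split_ifs with h1 h2 h3 h4 h5 h6 h7 h8 h9 h10 h11 <;>
      first
        | rfl
        | (first | subst h1 | subst h2 | subst h3 | subst h4 | subst h5 | subst h6
                 | subst h7 | subst h8 | subst h9 | subst h10 | subst h11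
           exact absurd (by decide) h)

-- single-character replace, at the go level: it is a pointwise map
theorem csc_replace_go (o n : Char) (l : List Char) (fuel : Nat) (acc : List Char)
    (h : l.length ≤ fuel) :
    PySem.Chars.replace.go [o] [n] fuel l acc =
      acc.reverse ++ l.map (fun c => if c = o then n else c) := by
  induction l generalizing fuel acc with
  | nil => cases fuel <;> simp [PySem.Chars.replace.go]
  | cons c t ih =>
    cases fuel with
    | zero => simp at h
    | succ f =>
      rw [PySem.Chars.replace.go]
      by_cases hc : c = o
      · subst hc
        simp only [List.isPrefixOf, BEq.rfl, Bool.true_and, if_pos]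
        simp only [List.length_cons, List.length_nil, List.drop_succ_cons, List.drop_zero]
        rw [ih f _ (by simpa using h)]
        simp
      · have hp : [o].isPrefixOf (c :: t) = false := by
          simp [List.isPrefixOf]
          exact fun he => absurd he.symm hc
        rw [hp]
        simp only [Bool.false_eq_true, if_false]
        rw [ih f _ (by simpa using h)]
        simp [hc]

-- single-character replace is a pointwise map
theorem csc_replace_single (o n : Char) (l : List Char) :
    PySem.Chars.replace l [o] [n] = l.map (fun c => if c = o then n else c) := by
  rw [PySem.Chars.replace]
  simp only [List.isEmpty_cons, Bool.false_eq_true, if_false]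
  simpa using csc_replace_go o n l l.length [] le_rfl

-- the composed digit→letter substitution is the dict lookup
theorem csc_comp_int (c : Char) :
    ([('0','O'),('1','I'),('5','S'),('6','G'),('2','Z'),('8','B'),('4','A'),('7','T')] :
        List (Char × Char)).foldl (fun a p => if a = p.1 then p.2 else a) c =
      dict_int_to_char.getD c c := by
  by_cases h0 : c = '0'; · subst h0; decide
  by_cases h1 : c = '1'; · subst h1; decide
  by_cases h5 : c = '5'; · subst h5; decide
  by_cases h6 : c = '6'; · subst h6; decide
  by_cases h2 : c = '2'; · subst h2; decide
  by_cases h8 : c = '8'; · subst h8; decide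
  by_cases h4 : c = '4'; · subst h4; decide
  by_cases h7 : c = '7'; · subst h7; decide
  have hd : dict_int_to_char = PySem.Dict.mk
      [('0','O'),('1','I'),('5','S'),('6','G'),('2','Z'),('8','B'),('4','A'),('7','T')] := by
    decide
  rw [hd]
  simp only [List.foldl_cons, List.foldl_nil,
    PySem.Dict.getD_eq_get?_getD, PySem.Dict.get?_mk_cons, beq_iff_eq]
  simp [h0, h1, h5, h6, h2, h8, h4, h7, Ne.symm h0, Ne.symm h1, Ne.symm h5, Ne.symm h6,
    Ne.symm h2, Ne.symm h8, Ne.symm h4, Ne.symm h7, PySem.Dict.get?]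

-- the composed letter→digit substitution is the dict lookup
theorem csc_comp_alpha (c : Char) :
    ([('O','0'),('I','1'),('S','5'),('G','6'),('Z','2'),('B','8'),('D','0'),
      ('Q','0'),('L','1'),('T','7'),('A','4')] :
        List (Char × Char)).foldl (fun a p => if a = p.1 then p.2 else a) c =
      dict_char_to_int.getD c c := by
  by_cases hO : c = 'O'; · subst hO; decide
  by_cases hI : c = 'I'; · subst hI; decide
  by_cases hS : c = 'S'; · subst hS; decide
  by_cases hG : c = 'G'; · subst hG; decide
  by_cases hZ : c = 'Z'; · subst hZ; decide
  by_cases hB : c = 'B'; · subst hB; decide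
  by_cases hD : c = 'D'; · subst hD; decide
  by_cases hQ : c = 'Q'; · subst hQ; decide
  by_cases hL : c = 'L'; · subst hL; decide
  by_cases hT : c = 'T'; · subst hT; decide
  by_cases hA : c = 'A'; · subst hA; decide
  have hd : dict_char_to_int = PySem.Dict.mk
      [('O','0'),('I','1'),('S','5'),('G','6'),('Z','2'),('B','8'),('D','0'),
       ('Q','0'),('L','1'),('T','7'),('A','4')] := by
    decide
  rw [hd]
  simp only [List.foldl_cons, List.foldl_nil,
    PySem.Dict.getD_eq_get?_getD, PySem.Dict.get?_mk_cons, beq_iff_eq]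
  simp [hO, hI, hS, hG, hZ, hB, hD, hQ, hL, hT, hA, Ne.symm hO, Ne.symm hI, Ne.symm hS,
    Ne.symm hG, Ne.symm hZ, Ne.symm hB, Ne.symm hD, Ne.symm hQ, Ne.symm hL, Ne.symm hT,
    Ne.symm hA, PySem.Dict.get?]

-- lifting the pair-list replace fold to strings of single characters
theorem csc_fold_replace_str (pairs : List (Char × Char)) (s : String) :
    (pairs.map (fun p => (String.ofList [p.1], String.ofList [p.2]))).foldl
        (fun t q => PySem.Str.replace t q.1 q.2) s =
      String.ofList (s.toList.map (fun c =>
        pairs.foldl (fun a p => if a = p.1 then p.2 else a) c)) := by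
  induction pairs generalizing s with
  | nil => simp
  | cons p ps ih =>
    rw [List.map_cons, List.foldl_cons, ih]
    simp only [PySem.Str.replace, String.toList_ofList]
    rw [csc_replace_single, List.map_map]
    rfl

-- B's replace loop over the digit→letter dict, as a map of the lookup
theorem csc_repl_int (s : String) :
    csc_replace_all b_dict_int_to_char s =
      String.mk (s.toList.map (fun c => dict_int_to_char.getD c c)) := by
  have hit : b_dict_int_to_char.items =
      ([('0','O'),('1','I'),('5','S'),('6','G'),('2','Z'),('8','B'),('4','A'),('7','T')] :
        List (Char × Char)).map (fun p => (String.ofList [p.1], String.ofList [p.2])) := by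
    decide
  rw [csc_replace_all, hit, csc_fold_replace_str]
  exact congrArg String.ofList (List.map_congr_left (fun c _ => csc_comp_int c))

-- B's replace loop over the letter→digit dict, as a map of the lookup
theorem csc_repl_alpha (s : String) :
    csc_replace_all b_dict_char_to_int s =
      String.mk (s.toList.map (fun c => dict_char_to_int.getD c c)) := by
  have hit : b_dict_char_to_int.items =
      ([('O','0'),('I','1'),('S','5'),('G','6'),('Z','2'),('B','8'),('D','0'),
        ('Q','0'),('L','1'),('T','7'),('A','4')] :
        List (Char × Char)).map (fun p => (String.ofList [p.1], String.ofList [p.2])) := by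
    decide
  rw [csc_replace_all, hit, csc_fold_replace_str]
  exact congrArg String.ofList (List.map_congr_left (fun c _ => csc_comp_alpha c))

-- ===== VERDICT (by name: the statement is the Claim_ definition above) =====
theorem correct_segment_characters_spec : Claim_equal_correct_segment_characters := by
  intro segment segment_type _
  unfold Spec_correct_segment_characters correct_segment_characters correct_segment_characters_alt
  by_cases h1 : segment_type ∈ ["state", "series"]
  · simp only [h1, if_pos]
    rw [csc_fold_if _ _ csc_step_int, csc_repl_int]
  · by_cases h2 : segment_type ∈ ["district", "number"]
    · simp only [h1, h2, if_pos, if_false]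
      rw [csc_fold_if _ _ csc_step_alpha, csc_repl_alpha]
    · simp only [h1, h2, if_false]
      rw [show (fun (acc : List Char) (char : Char) => acc ++ [char]) =
        fun acc char => acc ++ [id char] from rfl, csc_foldl_map]
      exact String.ofList_eq.mpr (by simp)
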